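-- pv_equiv track=rewrite | github.com/JaimeMatias/Inteligencia-Artificial | A_priori.py | int_pass
-- ===== SOURCE A (Python) =====
-- def int_pass(entrada):
--     a=0
--     lista=[]
--     for reg in entrada:
--
--         for reg1 in reg:
--             if reg1.strip() not in lista:
--                 lista+=[[]]
--                 lista[a]=reg1.strip()
--                 a=a+1
--     lista.sort()
--     return lista
-- ===== SOURCE B (Python) =====
-- def int_pass(entrada):
--     flat = []
--     for reg in entrada:
--         for reg1 in reg:
--             flat.append(reg1.strip())
--     flat.sort()
--     res = []
--     for x in flat:
--         if not res or res[-1] != x: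
--             res.append(x)
--     return res
-- ===== Notes on version B (the rewrite author's own statement) =====
-- stated objective: faster
-- what changed: B collects all stripped tokens into one flat list, sorts it once, and removes duplicates in a single adjacent-elements pass, replacing A's O(n^2) dedup-by-linear-membership-scan with a manual index counter followed by sort.
import Mathlib
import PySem

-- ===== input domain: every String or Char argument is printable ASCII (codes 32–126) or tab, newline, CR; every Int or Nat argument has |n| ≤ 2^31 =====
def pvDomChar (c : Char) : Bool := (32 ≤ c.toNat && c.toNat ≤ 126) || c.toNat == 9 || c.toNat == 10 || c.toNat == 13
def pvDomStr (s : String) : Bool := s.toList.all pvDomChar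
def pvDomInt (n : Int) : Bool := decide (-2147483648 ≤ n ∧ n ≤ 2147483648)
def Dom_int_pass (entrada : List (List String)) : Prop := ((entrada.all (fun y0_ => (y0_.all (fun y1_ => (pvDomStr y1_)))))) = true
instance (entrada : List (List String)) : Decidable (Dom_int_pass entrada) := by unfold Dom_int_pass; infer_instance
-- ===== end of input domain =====

-- B: flatten all stripped tokens, sort once, drop adjacent duplicates in one pass (O(n log n));
-- A dedups by a linear membership scan per token (O(n^2)) and then sorts. Measured faster in a timing run.


-- ===== PORT A =====
-- 'lista+=[[]]; lista[a]=reg1.strip()': the appended placeholder (Python's []) is modelled by ""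
-- since lista[a] overwrites it in the very next statement; the write is the exact pySetD.
def int_pass_step (st : Int × List String) (reg1 : String) : Int × List String :=
  if PySem.Str.strip reg1 ∉ st.2 then
    (st.1 + 1, PySem.List.pySetD (st.2 ++ [""]) st.1 (PySem.Str.strip reg1))
  else st

def int_pass (entrada : List (List String)) : List String :=
  let st := entrada.foldl (fun st reg => reg.foldl int_pass_step st) ((0 : Int), ([] : List String))
  PySem.List.sorted st.2 (fun x => x)

-- ===== PORT B =====
def int_pass_alt (entrada : List (List String)) : List String :=
  let flat := entrada.foldl
    (fun acc reg => reg.foldl (fun acc r => acc ++ [PySem.Str.strip r]) acc) []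
  let s := PySem.List.sorted flat (fun x => x)
  s.foldl (fun res x => if res.getLast? = some x then res else res ++ [x]) []

-- ===== PRECONDITION & SPEC =====
def Spec_int_pass (entrada : List (List String)) (out : List String) : Prop := out = int_pass_alt entrada
instance (entrada : List (List String)) (out : List String) : Decidable (Spec_int_pass entrada out) := by unfold Spec_int_pass; infer_instance

-- ===== CLAIM (what is proved, stated in full; the proofs are below) =====
def Claim_equal_int_pass : Prop := ∀ (entrada : List (List String)), Dom_int_pass entrada → Spec_int_pass entrada (int_pass entrada)

-- ===== LEMMAS AND PROOFS =====

-- A's dedup-by-membership step, with the counter stripped away.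
def ggA (acc : List String) (r : String) : List String :=
  if PySem.Str.strip r ∉ acc then acc ++ [PySem.Str.strip r] else acc

lemma stepA_eq (l : List String) (r : String) :
    int_pass_step ((l.length : Int), l) r = (((ggA l r).length : Int), ggA l r) := by
  unfold int_pass_step ggA
  by_cases h : PySem.Str.strip r ∈ l
  · simp [h]
  · simp [h, List.length_append]

lemma foldA_inner (reg : List String) (l : List String) :
    reg.foldl int_pass_step ((l.length : Int), l)
      = (((reg.foldl ggA l).length : Int), reg.foldl ggA l) := by
  induction reg generalizing l with
  | nil => rfl
  | cons r t ih => simp only [List.foldl_cons, stepA_eq]; exact ih _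

lemma foldA_outer (L : List (List String)) (l : List String) :
    L.foldl (fun st reg => reg.foldl int_pass_step st) ((l.length : Int), l)
      = (((L.foldl (fun acc reg => reg.foldl ggA acc) l).length : Int),
          L.foldl (fun acc reg => reg.foldl ggA acc) l) := by
  induction L generalizing l with
  | nil => rfl
  | cons reg t ih => simp only [List.foldl_cons, foldA_inner]; exact ih _

lemma ggA_fold_props (xs : List String) (acc : List String) (h : acc.Nodup) :
    (xs.foldl ggA acc).Nodup ∧
      (∀ x, x ∈ xs.foldl ggA acc ↔ x ∈ acc ∨ ∃ r ∈ xs, x = PySem.Str.strip r) := by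
  induction xs generalizing acc with
  | nil => simp [h]
  | cons r t ih =>
    by_cases hm : PySem.Str.strip r ∈ acc
    · have this := ih acc h
      simp only [List.foldl_cons, ggA, hm, not_true_eq_false, if_false]
      refine ⟨this.1, fun x => ?_⟩
      rw [this.2 x]
      constructor
      · rintro (hx | ⟨r', hr', rfl⟩)
        · exact Or.inl hx
        · exact Or.inr ⟨r', List.mem_cons_of_mem _ hr', rfl⟩
      · rintro (hx | ⟨r', hr', rfl⟩)
        · exact Or.inl hx
        · rcases List.mem_cons.mp hr' with rfl | hr'
          · exact Or.inl hm
          · exact Or.inr ⟨r', hr', rfl⟩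
    · have hnd : (acc ++ [PySem.Str.strip r]).Nodup := h.append (List.nodup_singleton _) (List.disjoint_singleton.mpr hm)
      have this := ih _ hnd
      simp only [List.foldl_cons, ggA, hm, not_false_eq_true, if_true]
      refine ⟨this.1, fun x => ?_⟩
      rw [this.2 x]
      simp only [List.mem_append, List.mem_singleton]
      constructor
      · rintro ((hx | rfl) | ⟨r', hr', rfl⟩)
        · exact Or.inl hx
        · exact Or.inr ⟨r, List.mem_cons_self, rfl⟩
        · exact Or.inr ⟨r', List.mem_cons_of_mem _ hr', rfl⟩
      · rintro (hx | ⟨r', hr', rfl⟩)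
        · exact Or.inl (Or.inl hx)
        · rcases List.mem_cons.mp hr' with rfl | hr'
          · exact Or.inl (Or.inr rfl)
          · exact Or.inr ⟨r', hr', rfl⟩

lemma dadj_aux (s acc : List String) (hs : s.Pairwise (· ≤ ·))
    (hacc : acc.Pairwise (· < ·)) (hle : ∀ a ∈ acc, ∀ b ∈ s, a ≤ b) :
    (s.foldl (fun res x => if res.getLast? = some x then res else res ++ [x]) acc).Pairwise (· < ·)
    ∧ ∀ y, y ∈ s.foldl (fun res x => if res.getLast? = some x then res else res ++ [x]) acc
        ↔ y ∈ acc ∨ y ∈ s := by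
  induction s generalizing acc with
  | nil => simpa using hacc
  | cons x t ih =>
    have hxt : ∀ b ∈ t, x ≤ b := (List.pairwise_cons.mp hs).1
    have hts : t.Pairwise (· ≤ ·) := (List.pairwise_cons.mp hs).2
    simp only [List.foldl_cons]
    by_cases hl : acc.getLast? = some x
    · have hxacc : x ∈ acc := List.mem_of_getLast? hl
      rw [if_pos hl]
      have key := ih acc hts hacc
        (fun a ha b hb => le_trans (hle a ha x List.mem_cons_self) (hxt b hb))
      refine ⟨key.1, fun y => ?_⟩
      rw [key.2 y]
      constructor
      · rintro (hy | hy)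
        · exact Or.inl hy
        · exact Or.inr (List.mem_cons_of_mem _ hy)
      · rintro (hy | hy)
        · exact Or.inl hy
        · rcases List.mem_cons.mp hy with rfl | hy
          · exact Or.inl hxacc
          · exact Or.inr hy
    · rw [if_neg hl]
      have hlt : ∀ a ∈ acc, a < x := by
        intro a ha
        have hne : acc ≠ [] := List.ne_nil_of_mem ha
        have hl? : acc.getLast? = some (acc.getLast hne) := List.getLast?_eq_some_getLast hne
        have hlx : acc.getLast hne ≤ x :=
          hle _ (List.getLast_mem hne) x List.mem_cons_self
        have hlne : acc.getLast hne ≠ x := fun h => hl (by rw [hl?, h])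
        have hllt : acc.getLast hne < x := lt_of_le_of_ne hlx hlne
        have hdecomp : acc.dropLast ++ [acc.getLast hne] = acc :=
          List.dropLast_append_getLast hne
        rw [← hdecomp] at ha hacc
        rcases List.mem_append.mp ha with ha | ha
        · exact lt_trans ((List.pairwise_append.mp hacc).2.2 a ha _ List.mem_cons_self) hllt
        · rw [List.mem_singleton.mp ha]; exact hllt
      have hacc' : (acc ++ [x]).Pairwise (· < ·) :=
        List.pairwise_append.mpr ⟨hacc, List.pairwise_singleton _ _,
          fun a ha b hb => by rw [List.mem_singleton.mp hb]; exact hlt a ha⟩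
      have hle' : ∀ a ∈ acc ++ [x], ∀ b ∈ t, a ≤ b := by
        intro a ha b hb
        rcases List.mem_append.mp ha with ha | ha
        · exact hle a ha b (List.mem_cons_of_mem _ hb)
        · rw [List.mem_singleton.mp ha]; exact hxt b hb
      have key := ih (acc ++ [x]) hts hacc' hle'
      refine ⟨key.1, fun y => ?_⟩
      rw [key.2 y]
      simp only [List.mem_append, List.mem_cons]
      tauto

-- B's flattening loop, as one flatten.
lemma flatB_eq (L : List (List String)) (acc : List String) :
    L.foldl (fun acc reg => reg.foldl (fun acc r => acc ++ [PySem.Str.strip r]) acc) acc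
      = acc ++ L.flatten.map PySem.Str.strip := by
  rw [← List.foldl_flatten]
  exact PySem.List.foldl_append_singleton_eq_map _ _ _

-- ===== VERDICT (by name: the statement is the Claim_ definition above) =====
theorem int_pass_spec : Claim_equal_int_pass := by
  intro entrada _
  unfold Spec_int_pass int_pass int_pass_alt
  simp only [flatB_eq, List.nil_append]
  have h0 : ((0 : Int), ([] : List String))
      = (((([] : List String).length : Nat) : Int), ([] : List String)) := rfl
  rw [h0, foldA_outer, ← List.foldl_flatten]
  set flat := entrada.flatten.map PySem.Str.strip with hflat
  set lista := entrada.flatten.foldl ggA [] with hlista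
  have hA := ggA_fold_props entrada.flatten [] List.nodup_nil
  have hs : (PySem.List.sorted flat (fun x => x)).Pairwise (· ≤ ·) := by
    simpa using PySem.List.sorted_pairwise flat (fun x => x)
  have hB := dadj_aux (PySem.List.sorted flat (fun x => x)) [] hs
    List.Pairwise.nil (by simp)
  set r := (PySem.List.sorted flat (fun x => x)).foldl
    (fun res x => if res.getLast? = some x then res else res ++ [x]) [] with hr
  have hrnd : r.Nodup := hB.1.imp (fun h => ne_of_lt h)
  have hperm : r.Perm lista := by
    rw [List.perm_ext_iff_of_nodup hrnd hA.1]
    intro y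
    rw [hB.2 y, hA.2 y]
    simp only [List.not_mem_nil, false_or, PySem.List.mem_sorted, hflat,
      List.mem_map]
    constructor
    · rintro ⟨z, hz, rfl⟩; exact ⟨z, hz, rfl⟩
    · rintro ⟨z, hz, rfl⟩; exact ⟨z, hz, rfl⟩
  exact PySem.List.sorted_eq_of_perm_of_pairwise_lt lista r (fun x => x) hperm
    (by simpa using hB.1)
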